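-- pv_equiv track=rewrite | github.com/jay-aye-see-kay/aoc2018 | 08/main.py | walk_two
-- ===== SOURCE A (Python) =====
-- def walk_two(index, tree):
--     num_children = tree[index]
--     index+=1
--     num_metadata = tree[index]
--     index+=1
--     child_values = []
--     value = 0
--     for _ in range(0, num_children):
--         child_value, index = walk_two(index, tree)
--         child_values.append(child_value)
--     for _ in range(0, num_metadata):
--         if num_children == 0:
--             value += tree[index]
--         else:
--             current_metadata = tree[index]
--             if current_metadata > 0 and current_metadata <= num_children:
--                 value += child_values[current_metadata-1]
--         index += 1
--     return value, index
-- ===== SOURCE B (Python) =====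
-- def walk_two(index, tree):
--     # Iterative: explicit stack of node frames instead of recursion.
--     # frame = [children_left, num_children, num_metadata, child_values]
--     stack = []
--     while True:
--         num_children = tree[index]
--         num_metadata = tree[index + 1]
--         index += 2
--         stack.append([max(num_children, 0), num_children, num_metadata, []])
--         while stack[-1][0] == 0:
--             _, nc, nm, cvs = stack.pop()
--             value = 0
--             for _ in range(nm):
--                 md = tree[index]
--                 if nc == 0:
--                     value += md
--                 elif 0 < md <= nc:
--                     value += cvs[md - 1]
--                 index += 1
--             if not stack:
--                 return value, index
--             stack[-1][0] -= 1
--             stack[-1][3].append(value)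
-- ===== Notes on version B (the rewrite author's own statement) =====
-- stated objective: alternative
-- what changed: A's recursive descent is replaced by an iterative stack machine: one loop advances a single index cursor over the flat array, pushing a frame (children-left, header, collected child values) per header and popping frames whose children are exhausted, folding each node's value into its parent.
import Mathlib
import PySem

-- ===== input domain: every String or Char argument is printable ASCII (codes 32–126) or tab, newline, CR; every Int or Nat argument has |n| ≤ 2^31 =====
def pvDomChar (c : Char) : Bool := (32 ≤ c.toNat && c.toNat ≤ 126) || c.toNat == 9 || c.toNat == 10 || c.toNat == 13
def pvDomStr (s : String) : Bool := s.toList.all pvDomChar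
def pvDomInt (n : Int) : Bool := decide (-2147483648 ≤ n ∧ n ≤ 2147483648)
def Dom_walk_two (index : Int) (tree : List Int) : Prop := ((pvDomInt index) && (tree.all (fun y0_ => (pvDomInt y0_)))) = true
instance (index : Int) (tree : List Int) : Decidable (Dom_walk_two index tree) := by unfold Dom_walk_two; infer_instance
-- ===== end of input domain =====

-- B replaces A's recursion by an explicit stack machine over the same flat array (alternative
-- decomposition, same cost); equivalence is proved on well-formed inputs (Pre_).

-- ===== PORT A =====
-- A's metadata loop: reads num_metadata entries, summing raw entries for a leaf, else the
-- 1-based-indexed child values.  cvs.getD (t-1).toNat 0 is exact: Python indexes cvs[t-1]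
-- only under the guard 0 < t ≤ nc, where it is always in range.
def metaA (tree : List Int) (nc : Int) (cvs : List Int) : Nat → Int → Int → Option (Int × Int)
  | 0, i, v => some (v, i)
  | k+1, i, v =>
    match PySem.List.pyGet? tree i with
    | none => none
    | some t =>
      metaA tree nc cvs k (i + 1)
        (if nc = 0 then v + t
         else if 0 < t ∧ t ≤ nc then v + cvs.getD (t - 1).toNat 0 else v)

-- Python A raises IndexError on malformed input; the fuel/Option wrapper only makes the same
-- recursion total (fuel tree.length + 2 exceeds the nesting depth of any parse that succeeds,
-- and Pre_ admits exactly inputs where the result is `some`).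
mutual
def goA (tree : List Int) : Nat → Int → Option (Int × Int)
  | 0, _ => none
  | f+1, i =>
    match PySem.List.pyGet? tree i with
    | none => none
    | some nc =>
      match PySem.List.pyGet? tree (i + 1) with
      | none => none
      | some nm =>
        match childrenA tree f nc.toNat (i + 2) [] with
        | none => none
        | some (cvs, j) => metaA tree nc cvs nm.toNat j 0
  termination_by f i => (f, 0)

def childrenA (tree : List Int) : Nat → Nat → Int → List Int → Option (List Int × Int)
  | _, 0, i, acc => some (acc, i)
  | f, k+1, i, acc =>
    match goA tree f i with
    | none => none
    | some (cv, i') => childrenA tree f k i' (acc ++ [cv])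
  termination_by f k i acc => (f, k + 1)
end

def walk_two (index : Int) (tree : List Int) : Int × Int :=
  (goA tree (tree.length + 2) index).getD (0, 0)

-- ===== PORT B =====
-- frame = (children_left, num_children, num_metadata, child_values), as in Source B
abbrev Frame : Type := Nat × Int × Int × List Int

-- Source B's inner metadata for-loop (same loop body as A's — the two Pythons share it verbatim)
def metaB (tree : List Int) (nc : Int) (cvs : List Int) : Nat → Int → Int → Option (Int × Int)
  | 0, i, v => some (v, i)
  | k+1, i, v =>
    match PySem.List.pyGet? tree i with
    | none => none
    | some t =>
      metaB tree nc cvs k (i + 1)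
        (if nc = 0 then v + t
         else if 0 < t ∧ t ≤ nc then v + cvs.getD (t - 1).toNat 0 else v)

-- Source B's inner while-loop: pop finished frames, folding each value into its parent frame;
-- .inl = resume the outer loop (read next header), .inr = stack ran empty, return.
def unwindB (tree : List Int) : Int → List Frame → Option ((Int × List Frame) ⊕ (Int × Int))
  | _, [] => none
  | i, (cl, nc, nm, cvs) :: rest =>
    if cl ≠ 0 then some (.inl (i, (cl, nc, nm, cvs) :: rest))
    else
      match metaB tree nc cvs nm.toNat i 0 with
      | none => none
      | some (v, i') =>
        match rest with
        | [] => some (.inr (v, i'))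
        | (cl', nc', nm', cvs') :: rest' =>
          unwindB tree i' ((cl' - 1, nc', nm', cvs' ++ [v]) :: rest')
  termination_by i st => st.length

-- Source B's outer while-True loop: read a header, push a frame, unwind.  Fuel only makes the
-- loop total; one unit is spent per header read.
def loopB (tree : List Int) : Nat → Int → List Frame → Option (Int × Int)
  | 0, _, _ => none
  | f+1, i, stack =>
    match PySem.List.pyGet? tree i with
    | none => none
    | some nc =>
      match PySem.List.pyGet? tree (i + 1) with
      | none => none
      | some nm =>
        match unwindB tree (i + 2) ((nc.toNat, nc, nm, []) :: stack) with
        | none => none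
        | some (.inr a) => some a
        | some (.inl (i', st')) => loopB tree f i' st'

def walk_two_alt (index : Int) (tree : List Int) : Int × Int :=
  (loopB tree (tree.length + 2) index []).getD (0, 0)

-- ===== PRECONDITION & SPEC =====
-- run `step` on cnt consecutive siblings, threading the cursor
def chkSib (step : Int → Option Int) : Nat → Int → Option Int
  | 0, i => some i
  | k+1, i =>
    match step i with
    | none => none
    | some j => chkSib step k j

-- grammar acceptor for the flat tree encoding: a well-formed node at i needs its 2-entry
-- header in range, nc well-formed children, then nm metadata entries in range; returns the
-- end cursor.  Fuel tree.length + 2 exceeds any possible nesting depth (each level costs 2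
-- cells), so it never cuts a valid parse short.
def chkNode (tree : List Int) : Nat → Int → Option Int
  | 0, _ => none
  | f+1, i =>
    if h : -(tree.length : Int) ≤ i ∧ i + 1 < (tree.length : Int) then
      let nc := (PySem.List.pyGet? tree i).getD 0
      let nm := (PySem.List.pyGet? tree (i + 1)).getD 0
      match chkSib (fun x => chkNode tree f x) nc.toNat (i + 2) with
      | none => none
      | some j =>
        if -(tree.length : Int) ≤ j ∧ j + (nm.toNat : Int) ≤ (tree.length : Int)
        then some (j + nm.toNat) else none
    else none

-- Pre_ excludes exactly the inputs on which Python A raises IndexError (malformed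
-- encodings); it admits wraparound (negative, ≥ -len) start indices, which A accepts.
def Pre_walk_two (index : Int) (tree : List Int) : Prop :=
  (chkNode tree (tree.length + 2) index).isSome = true
instance (index : Int) (tree : List Int) : Decidable (Pre_walk_two index tree) := by
  unfold Pre_walk_two; infer_instance

def pvWitness_walk_two : Int × List Int := (0, [2, 2, 0, 2, 10, 11, 1, 1, 0, 1, 99, 2, 1, 2])

def Spec_walk_two (index : Int) (tree : List Int) (out : Int × Int) : Prop := out = walk_two_alt index tree
instance (index : Int) (tree : List Int) (out : Int × Int) : Decidable (Spec_walk_two index tree out) := by unfold Spec_walk_two; infer_instance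

-- ===== CLAIM (what is proved, stated in full; the proofs are below) =====
def Claim_equal_walk_two : Prop := ∀ (index : Int) (tree : List Int), Dom_walk_two index tree → Pre_walk_two index tree → Spec_walk_two index tree (walk_two index tree)

-- ===== LEMMAS AND PROOFS =====

lemma metaB_eq_metaA (tree : List Int) (nc : Int) (cvs : List Int) :
    ∀ (k : Nat) (i v : Int), metaB tree nc cvs k i v = metaA tree nc cvs k i v := by
  intro k
  induction k with
  | zero => intro i v; rfl
  | succ k ih =>
    intro i v
    simp only [metaB, metaA]
    cases PySem.List.pyGet? tree i with
    | none => rfl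
    | some t => exact ih _ _

lemma metaA_end (tree : List Int) (nc : Int) (cvs : List Int) :
    ∀ (k : Nat) (i v v' j : Int), metaA tree nc cvs k i v = some (v', j) → j = i + k := by
  intro k
  induction k with
  | zero => intro i v v' j h; simp [metaA] at h; omega
  | succ k ih =>
    intro i v v' j h
    simp only [metaA] at h
    cases hg : PySem.List.pyGet? tree i with
    | none => rw [hg] at h; simp at h
    | some t =>
      rw [hg] at h
      have := ih (i + 1) _ v' j h
      omega

lemma metaA_some (tree : List Int) (nc : Int) (cvs : List Int) :
    ∀ (k : Nat) (i v : Int), -(tree.length : Int) ≤ i → i + k ≤ (tree.length : Int) →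
      ∃ v', metaA tree nc cvs k i v = some (v', i + k) := by
  intro k
  induction k with
  | zero => intro i v _ _; exact ⟨v, by simp [metaA]⟩
  | succ k ih =>
    intro i v hi hk
    have hk' : i + 1 + (k : Int) ≤ (tree.length : Int) := by push_cast at hk; omega
    have hlt : i < (tree.length : Int) := by omega
    cases hg : PySem.List.pyGet? tree i with
    | none =>
      rw [PySem.List.pyGet?_eq_none_iff] at hg
      exact absurd (show PySem.Raise.InRange tree.length i from ⟨hi, hlt⟩) hg
    | some t =>
      obtain ⟨v', hv'⟩ := ih (i + 1)
        (if nc = 0 then v + t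
         else if 0 < t ∧ t ≤ nc then v + cvs.getD (t - 1).toNat 0 else v)
        (by omega) hk'
      refine ⟨v', ?_⟩
      simp only [metaA, hg, hv']
      simp only [Option.some.injEq, Prod.mk.injEq]
      exact ⟨trivial, by push_cast; omega⟩

-- interpret an unwindB outcome with k fuel left for the outer loop
def interpU (tree : List Int) (k : Nat) : Option ((Int × List Frame) ⊕ (Int × Int)) → Option (Int × Int)
  | none => none
  | some (.inr a) => some a
  | some (.inl (i, s)) => loopB tree k i s

-- what the machine does after finishing a node of value v at cursor j with `stack` pending
def resume (tree : List Int) (v j : Int) (stack : List Frame) (k : Nat) : Option (Int × Int) :=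
  match stack with
  | [] => some (v, j)
  | (cl, nc, nm, cvs) :: rest => interpU tree k (unwindB tree j ((cl - 1, nc, nm, cvs ++ [v]) :: rest))

lemma loopB_succ (tree : List Int) (f : Nat) (i : Int) (stack : List Frame) :
    loopB tree (f + 1) i stack
      = match PySem.List.pyGet? tree i with
        | none => none
        | some nc =>
          match PySem.List.pyGet? tree (i + 1) with
          | none => none
          | some nm => interpU tree f (unwindB tree (i + 2) ((nc.toNat, nc, nm, []) :: stack)) := by
  simp only [loopB]
  cases PySem.List.pyGet? tree i with
  | none => rfl
  | some nc =>
    cases PySem.List.pyGet? tree (i + 1) with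
    | none => rfl
    | some nm =>
      cases unwindB tree (i + 2) ((nc.toNat, nc, nm, []) :: stack) with
      | none => rfl
      | some r => cases r with
        | inl p => rfl
        | inr a => rfl

-- popping a finished frame: unwinding after its metadata is read behaves like `resume`
lemma unwind_pop (tree : List Int) (nc nm : Int) (cvs : List Int) (j1 v j : Int)
    (hmeta : metaA tree nc cvs nm.toNat j1 0 = some (v, j)) :
    ∀ (k : Nat) (stack : List Frame),
      interpU tree k (unwindB tree j1 ((0, nc, nm, cvs) :: stack)) = resume tree v j stack k := by
  intro k stack
  have hmB : metaB tree nc cvs nm.toNat j1 0 = some (v, j) := by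
    rw [metaB_eq_metaA]; exact hmeta
  cases stack with
  | nil =>
    rw [unwindB.eq_2]
    simp only [ne_eq, not_true_eq_false, if_false, hmB]
    rfl
  | cons fr rest =>
    obtain ⟨cl', nc', nm', cvs'⟩ := fr
    rw [unwindB.eq_2]
    simp only [ne_eq, not_true_eq_false, if_false, hmB]
    rfl

-- the stack machine simulates a run of the recursion over a whole list of siblings
lemma kids_sim (tree : List Int) (f : Nat)
    (IH : ∀ (i v j : Int), goA tree f i = some (v, j) →
      ∃ n : Nat, 2 * (n : Int) ≤ j - i ∧
        ∀ (k : Nat) (stack : List Frame), loopB tree (n + k) i stack = resume tree v j stack k) :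
    ∀ (cnt : Nat) (i0 : Int) (acc cvs : List Int) (j1 : Int),
      childrenA tree f (cnt + 1) i0 acc = some (cvs, j1) →
      ∃ m : Nat, 2 * (m : Int) ≤ j1 - i0 ∧
        ∀ (k : Nat) (nc nm : Int) (rest : List Frame),
          loopB tree (m + k) i0 ((cnt + 1, nc, nm, acc) :: rest)
            = interpU tree k (unwindB tree j1 ((0, nc, nm, cvs) :: rest)) := by
  intro cnt
  induction cnt with
  | zero =>
    intro i0 acc cvs j1 hch
    rw [childrenA.eq_2] at hch
    cases hg : goA tree f i0 with
    | none =>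
      rw [hg] at hch
      exact absurd (show (none : Option (List Int × Int)) = some (cvs, j1) from hch) (by simp)
    | some p =>
      obtain ⟨cv, i1⟩ := p
      rw [hg] at hch
      have hch2 : childrenA tree f 0 i1 (acc ++ [cv]) = some (cvs, j1) := hch
      rw [childrenA.eq_1] at hch2
      simp only [Option.some.injEq, Prod.mk.injEq] at hch2
      obtain ⟨hcvs, hj1⟩ := hch2
      obtain ⟨n1, hb, hl⟩ := IH i0 cv i1 hg
      refine ⟨n1, by omega, ?_⟩
      intro k nc nm rest
      rw [hl k ((1, nc, nm, acc) :: rest)]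
      simp only [resume]
      subst hcvs hj1
      have h11 : (1 : Nat) - 1 = 0 := rfl
      rw [h11]
  | succ cnt ih =>
    intro i0 acc cvs j1 hch
    rw [childrenA.eq_2] at hch
    cases hg : goA tree f i0 with
    | none =>
      rw [hg] at hch
      exact absurd (show (none : Option (List Int × Int)) = some (cvs, j1) from hch) (by simp)
    | some p =>
      obtain ⟨cv, i1⟩ := p
      rw [hg] at hch
      have hch2 : childrenA tree f (cnt + 1) i1 (acc ++ [cv]) = some (cvs, j1) := hch
      obtain ⟨n1, hb1, hl1⟩ := IH i0 cv i1 hg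
      obtain ⟨m', hb2, hl2⟩ := ih i1 (acc ++ [cv]) cvs j1 hch2
      refine ⟨n1 + m', by push_cast; omega, ?_⟩
      intro k nc nm rest
      have hfuel : n1 + m' + k = n1 + (m' + k) := by omega
      rw [hfuel, hl1 (m' + k) ((cnt + 1 + 1, nc, nm, acc) :: rest)]
      simp only [resume]
      have hcl : (cnt + 1 + 1 : Nat) - 1 = cnt + 1 := by omega
      rw [hcl]
      have hstep : unwindB tree i1 ((cnt + 1, nc, nm, acc ++ [cv]) :: rest)
          = some (.inl (i1, (cnt + 1, nc, nm, acc ++ [cv]) :: rest)) := by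
        rw [unwindB.eq_2]
        simp
      rw [hstep]
      simp only [interpU]
      exact hl2 k nc nm rest

-- main simulation: if the recursion returns (v, j) from cursor i, the stack machine,
-- started at i with any pending stack, resumes with value v at cursor j
lemma node_sim (tree : List Int) :
    ∀ (f : Nat) (i v j : Int), goA tree f i = some (v, j) →
      ∃ n : Nat, 2 * (n : Int) ≤ j - i ∧
        ∀ (k : Nat) (stack : List Frame), loopB tree (n + k) i stack = resume tree v j stack k := by
  intro f
  induction f with
  | zero => intro i v j h; simp [goA] at h
  | succ f IH =>
    intro i v j h
    rw [goA.eq_2] at h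
    cases hc : PySem.List.pyGet? tree i with
    | none =>
      rw [hc] at h
      exact absurd (show (none : Option (Int × Int)) = some (v, j) from h) (by simp)
    | some nc =>
      rw [hc] at h
      cases hm : PySem.List.pyGet? tree (i + 1) with
      | none =>
        rw [hm] at h
        exact absurd (show (none : Option (Int × Int)) = some (v, j) from h) (by simp)
      | some nm =>
        rw [hm] at h
        have h2 : (match childrenA tree f nc.toNat (i + 2) [] with
                   | none => none
                   | some (cvs, j) => metaA tree nc cvs nm.toNat j 0) = some (v, j) := h
        cases hch : childrenA tree f nc.toNat (i + 2) [] with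
        | none =>
          rw [hch] at h2
          exact absurd (show (none : Option (Int × Int)) = some (v, j) from h2) (by simp)
        | some p =>
          obtain ⟨cvs, j1⟩ := p
          rw [hch] at h2
          have hmeta : metaA tree nc cvs nm.toNat j1 0 = some (v, j) := h2
          have hjj1 : j = j1 + nm.toNat := metaA_end tree nc cvs nm.toNat j1 0 v j hmeta
          cases h0 : nc.toNat with
          | zero =>
            rw [h0] at hch
            rw [childrenA.eq_1] at hch
            simp only [Option.some.injEq, Prod.mk.injEq] at hch
            obtain ⟨hcvs, hj1⟩ := hch
            refine ⟨1, by omega, ?_⟩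
            intro k stack
            have hk : 1 + k = k + 1 := by omega
            rw [hk, loopB_succ, hc, hm]
            show interpU tree k (unwindB tree (i + 2) ((nc.toNat, nc, nm, []) :: stack))
                = resume tree v j stack k
            rw [h0]
            exact unwind_pop tree nc nm [] (i + 2) v j
              (by rw [hcvs, hj1]; exact hmeta) k stack
          | succ c =>
            rw [h0] at hch
            obtain ⟨m, hbm, hlm⟩ := kids_sim tree f IH c (i + 2) [] cvs j1 hch
            refine ⟨m + 1, by push_cast; omega, ?_⟩
            intro k stack
            have hk : m + 1 + k = (m + k) + 1 := by omega
            rw [hk, loopB_succ, hc, hm]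
            show interpU tree (m + k) (unwindB tree (i + 2) ((nc.toNat, nc, nm, []) :: stack))
                = resume tree v j stack k
            rw [h0]
            have hstep : unwindB tree (i + 2) ((c + 1, nc, nm, []) :: stack)
                = some (.inl (i + 2, (c + 1, nc, nm, []) :: stack)) := by
              rw [unwindB.eq_2]
              simp
            rw [hstep]
            simp only [interpU]
            rw [hlm k nc nm stack]
            exact unwind_pop tree nc nm cvs j1 v j hmeta k stack

lemma pyGet?_some_getD (tree : List Int) (i : Int) (h0 : -(tree.length : Int) ≤ i)
    (hl : i < (tree.length : Int)) :
    PySem.List.pyGet? tree i = some ((PySem.List.pyGet? tree i).getD 0) := by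
  cases hx : PySem.List.pyGet? tree i with
  | none =>
    rw [PySem.List.pyGet?_eq_none_iff] at hx
    exact absurd (show PySem.Raise.InRange tree.length i from ⟨h0, hl⟩) hx
  | some t => rfl

-- the acceptor only accepts runs of siblings on which A's children loop returns
lemma chkSib_goA (tree : List Int) (f : Nat)
    (IH : ∀ (i j : Int), chkNode tree f i = some j →
      -(tree.length : Int) ≤ i ∧ i + 2 ≤ j ∧ j ≤ (tree.length : Int) ∧ ∃ v, goA tree f i = some (v, j)) :
    ∀ (cnt : Nat) (i j : Int) (acc : List Int), -(tree.length : Int) ≤ i → i ≤ (tree.length : Int) →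
      chkSib (fun x => chkNode tree f x) cnt i = some j →
      -(tree.length : Int) ≤ j ∧ i ≤ j ∧ j ≤ (tree.length : Int) ∧
        ∃ vs, childrenA tree f cnt i acc = some (acc ++ vs, j) := by
  intro cnt
  induction cnt with
  | zero =>
    intro i j acc h0 hl hs
    simp only [chkSib, Option.some.injEq] at hs
    subst hs
    refine ⟨h0, le_refl _, hl, [], ?_⟩
    rw [childrenA.eq_1]
    simp
  | succ cnt ih =>
    intro i j acc h0 hl hs
    simp only [chkSib] at hs
    cases hn : chkNode tree f i with
    | none => rw [hn] at hs; simp at hs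
    | some j' =>
      rw [hn] at hs
      obtain ⟨_, hij', hj'l, v, hgo⟩ := IH i j' hn
      obtain ⟨hj0, hj'j, hjl, vs, hch⟩ := ih j' j (acc ++ [v]) (by omega) hj'l hs
      refine ⟨hj0, by omega, hjl, v :: vs, ?_⟩
      rw [childrenA.eq_2, hgo]
      show childrenA tree f cnt j' (acc ++ [v]) = some (acc ++ v :: vs, j)
      rw [hch]
      simp

-- the acceptor only accepts inputs on which A's recursion returns, with the same end cursor
lemma chk_goA (tree : List Int) :
    ∀ (f : Nat) (i j : Int), chkNode tree f i = some j →
      -(tree.length : Int) ≤ i ∧ i + 2 ≤ j ∧ j ≤ (tree.length : Int) ∧ ∃ v, goA tree f i = some (v, j) := by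
  intro f
  induction f with
  | zero => intro i j h; simp [chkNode] at h
  | succ f IH =>
    intro i j h
    simp only [chkNode] at h
    by_cases hg : -(tree.length : Int) ≤ i ∧ i + 1 < (tree.length : Int)
    · rw [dif_pos hg] at h
      obtain ⟨h0, hlt⟩ := hg
      cases hs : chkSib (fun x => chkNode tree f x)
          ((PySem.List.pyGet? tree i).getD 0).toNat (i + 2) with
      | none =>
        rw [hs] at h
        exact absurd (show (none : Option Int) = some j from h) (by simp)
      | some j1 =>
        rw [hs] at h
        have h2 : (if -(tree.length : Int) ≤ j1 ∧
              j1 + ((((PySem.List.pyGet? tree (i + 1)).getD 0).toNat : Nat) : Int) ≤ (tree.length : Int)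
            then some (j1 + ((((PySem.List.pyGet? tree (i + 1)).getD 0).toNat : Nat) : Int)) else none)
            = some j := h
        by_cases hml : -(tree.length : Int) ≤ j1 ∧
            j1 + ((((PySem.List.pyGet? tree (i + 1)).getD 0).toNat : Nat) : Int) ≤ (tree.length : Int)
        · rw [if_pos hml] at h2
          simp only [Option.some.injEq] at h2
          obtain ⟨hj1r, hmlen⟩ := hml
          obtain ⟨hj10, hij1, hj1l, vs, hch⟩ :=
            chkSib_goA tree f IH ((PySem.List.pyGet? tree i).getD 0).toNat (i + 2) j1 []
              (by omega) (by omega) hs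
          obtain ⟨v, hv⟩ := metaA_some tree ((PySem.List.pyGet? tree i).getD 0) vs
            ((PySem.List.pyGet? tree (i + 1)).getD 0).toNat j1 0 hj1r (by omega)
          refine ⟨h0, by omega, by omega, v, ?_⟩
          simp only [List.nil_append] at hch
          rw [goA.eq_2, pyGet?_some_getD tree i h0 (by omega),
            pyGet?_some_getD tree (i + 1) (by omega) hlt]
          show (match childrenA tree f ((PySem.List.pyGet? tree i).getD 0).toNat (i + 2) [] with
                | none => none
                | some (cvs, j) =>
                  metaA tree ((PySem.List.pyGet? tree i).getD 0) cvs
                    ((PySem.List.pyGet? tree (i + 1)).getD 0).toNat j 0)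
              = some (v, j)
          rw [hch]
          show metaA tree ((PySem.List.pyGet? tree i).getD 0) vs
              ((PySem.List.pyGet? tree (i + 1)).getD 0).toNat j1 0
              = some (v, j)
          rw [hv, h2]
        · rw [if_neg hml] at h2
          exact absurd h2 (by simp)
    · rw [dif_neg hg] at h
      exact absurd h (by simp)

-- ===== VERDICT (by name: the statement is the Claim_ definition above) =====
theorem walk_two_spec : Claim_equal_walk_two := by
  intro index tree _ hpre
  unfold Pre_walk_two at hpre
  rw [Option.isSome_iff_exists] at hpre
  obtain ⟨j, hchk⟩ := hpre
  obtain ⟨h0, hij, hjl, v, hgo⟩ := chk_goA tree (tree.length + 2) index j hchk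
  obtain ⟨n, hbn, hln⟩ := node_sim tree (tree.length + 2) index v j hgo
  have hn : n ≤ tree.length + 2 := by omega
  have hsplit : n + (tree.length + 2 - n) = tree.length + 2 := by omega
  unfold Spec_walk_two walk_two walk_two_alt
  rw [hgo, ← hsplit, hln (tree.length + 2 - n) []]
  rfl
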